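-- pv_equiv track=rewrite | github.com/ThomasCabaret/CyclicCA | science_scraper.py | determine_dominant_theme
-- ===== SOURCE A (Python) =====
-- def determine_dominant_theme(scores):
--     mx = max(scores.values()) if scores else 0
--     if mx == 0:
--         return ""
--     top = [t for t, s in scores.items() if s == mx]
--     if len(top) == 1:
--         return top[0]
--     return "multiple"
-- ===== SOURCE B (Python) =====
-- def determine_dominant_theme(scores):
--     best_val = None
--     best_key = ""
--     tie_count = 0
--     for t, s in scores.items():
--         if best_val is None or s > best_val:
--             best_val, best_key, tie_count = s, t, 1
--         elif s == best_val:
--             tie_count += 1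
--     if best_val is None or best_val == 0:
--         return ""
--     if tie_count == 1:
--         return best_key
--     return "multiple"
-- ===== Notes on version B (the rewrite author's own statement) =====
-- stated objective: alternative
-- what changed: Replaces max() over values plus a filtering comprehension (two passes and an intermediate list) with one stateful pass maintaining best value, first best key and a tie counter.
import Mathlib
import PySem

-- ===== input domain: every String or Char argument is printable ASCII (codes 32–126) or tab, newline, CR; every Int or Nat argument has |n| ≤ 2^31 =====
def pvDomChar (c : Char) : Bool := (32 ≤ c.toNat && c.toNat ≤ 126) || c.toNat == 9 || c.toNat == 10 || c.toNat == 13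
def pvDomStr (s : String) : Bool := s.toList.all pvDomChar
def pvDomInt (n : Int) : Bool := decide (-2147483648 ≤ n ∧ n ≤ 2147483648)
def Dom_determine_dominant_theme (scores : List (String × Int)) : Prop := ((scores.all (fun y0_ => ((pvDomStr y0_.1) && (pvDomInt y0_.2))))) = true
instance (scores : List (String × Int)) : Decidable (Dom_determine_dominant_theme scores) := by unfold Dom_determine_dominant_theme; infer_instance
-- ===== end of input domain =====

-- B replaces A's max()+filter comprehension (two passes and an intermediate list) with a single
-- stateful pass maintaining the best value, its first key and a tie counter; same O(n) cost.


-- ===== PORT A =====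
-- mx = max(scores.values()) if scores else 0; if mx == 0: ""; top = [t for t,s in items if s == mx];
-- if len(top) == 1: top[0]; else "multiple"
def determine_dominant_theme (scores : List (String × Int)) : String :=
  let mx : Int :=
    if scores ≠ [] then
      (PySem.List.max? (scores.map Prod.snd) (fun y => y)).getD 0
    else 0
  if mx = 0 then ""
  else
    let top : List String := (scores.filter (fun p => p.2 == mx)).map Prod.fst
    if top.length = 1 then (PySem.List.pyGet? top 0).getD "" else "multiple"

-- ===== PORT B =====
-- loop state: (best_val : Option Int, best_key, tie_count)
def ddtStep (st : Option Int × String × Int) (p : String × Int) : Option Int × String × Int :=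
  match st with
  | (none, _, _) => (some p.2, p.1, 1)
  | (some b, k, c) =>
      if p.2 > b then (some p.2, p.1, 1)
      else if p.2 = b then (some b, k, c + 1)
      else (some b, k, c)

def determine_dominant_theme_alt (scores : List (String × Int)) : String :=
  match scores.foldl ddtStep (none, "", 0) with
  | (none, _, _) => ""
  | (some b, k, c) => if b = 0 then "" else if c = 1 then k else "multiple"

-- ===== PRECONDITION & SPEC =====
def Spec_determine_dominant_theme (scores : List (String × Int)) (out : String) : Prop := out = determine_dominant_theme_alt scores
instance (scores : List (String × Int)) (out : String) : Decidable (Spec_determine_dominant_theme scores out) := by unfold Spec_determine_dominant_theme; infer_instance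

-- ===== CLAIM (what is proved, stated in full; the proofs are below) =====
def Claim_equal_determine_dominant_theme : Prop := ∀ (scores : List (String × Int)), Dom_determine_dominant_theme scores → Spec_determine_dominant_theme scores (determine_dominant_theme scores)

-- ===== LEMMAS AND PROOFS =====

-- running max over the values, starting from b
def ddtMax (xs : List (String × Int)) (b : Int) : Int :=
  xs.foldl (fun a p => max a p.2) b

theorem le_ddtMax (xs : List (String × Int)) (b : Int) : b ≤ ddtMax xs b := by
  induction xs generalizing b with
  | nil => simp [ddtMax]
  | cons p t ih =>
      calc b ≤ max b p.2 := le_max_left _ _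
        _ ≤ ddtMax t (max b p.2) := ih _
        _ = ddtMax (p :: t) b := rfl

theorem ddtMax_eq (t : List (String × Int)) (b : Int) :
    (t.map Prod.snd).foldl max b = ddtMax t b := by
  rw [List.foldl_map]; rfl

theorem ddt_find_exists (t : List (String × Int)) (b : Int) (h : ¬ ddtMax t b = b) :
    ∃ x, t.find? (fun q => q.2 == ddtMax t b) = some x := by
  rcases PySem.List.foldl_max_mem (t.map Prod.snd) b with h1 | h1 <;> rw [ddtMax_eq] at h1
  · exact absurd h1 h
  · obtain ⟨q, hq, hq2⟩ := List.mem_map.mp h1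
    rw [← Option.isSome_iff_exists, List.find?_isSome]
    exact ⟨q, hq, by simp [hq2]⟩

-- invariant of B's loop once the state is `some`
theorem foldl_ddtStep_some (xs : List (String × Int)) (b : Int) (k : String) (c : Int) :
    xs.foldl ddtStep (some b, k, c) =
      (some (ddtMax xs b),
       (if ddtMax xs b = b then k
        else (((xs.find? (fun p => p.2 == ddtMax xs b)).map Prod.fst).getD k)),
       (if ddtMax xs b = b then c else 0) + (xs.countP (fun p => p.2 == ddtMax xs b) : Int)) := by
  induction xs generalizing b k c with
  | nil => simp [ddtMax]
  | cons p t ih =>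
      have hM : ddtMax (p :: t) b = ddtMax t (max b p.2) := rfl
      rcases lt_trichotomy b p.2 with h | h | h
      · -- p.2 > b : reset
        have hmax : max b p.2 = p.2 := max_eq_right h.le
        have hle : p.2 ≤ ddtMax t p.2 := le_ddtMax t p.2
        have hstep : ddtStep (some b, k, c) p = (some p.2, p.1, 1) := by
          simp [ddtStep, h]
        have hne2 : ¬ ddtMax t p.2 = b := by omega
        rw [List.foldl_cons, hstep, ih, hM, hmax, Prod.mk.injEq, Prod.mk.injEq]
        refine ⟨rfl, ?_, ?_⟩
        · by_cases he : ddtMax t p.2 = p.2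
          · rw [if_pos he, if_neg hne2,
              List.find?_cons_of_pos (l := t) (by simp [he]),
              Option.map_some, Option.getD_some]
          · obtain ⟨x, hx⟩ := ddt_find_exists t p.2 he
            rw [if_neg he, if_neg hne2,
              List.find?_cons_of_neg (l := t) (by simp; omega), hx]
            simp
        · rw [List.countP_cons, if_neg hne2]
          by_cases he : ddtMax t p.2 = p.2
          · rw [if_pos he]
            simp only [he, beq_self_eq_true, if_true]
            push_cast
            ring
          · rw [if_neg he]
            have : (p.2 == ddtMax t p.2) = false := by simp; omega
            simp [this]
      · -- p.2 = b : tie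
        have hmax : max b p.2 = b := by omega
        simp only [List.foldl_cons, ddtStep, if_neg (by omega : ¬ p.2 > b),
          if_pos h.symm, ih, hM, hmax]
        by_cases he : ddtMax t b = b
        · have hb2 : (p.2 == ddtMax t b) = true := by rw [beq_iff_eq, he]; omega
          simp [List.countP_cons, hb2, he]
          omega
        · have hb2 : (p.2 == ddtMax t b) = false := by
            rw [beq_eq_false_iff_ne]
            intro hbad
            exact he (by omega)
          simp [List.countP_cons, hb2, he]
      · -- p.2 < b : skip
        have hmax : max b p.2 = b := by omega
        have hle : b ≤ ddtMax t b := le_ddtMax t b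
        have : (p.2 == ddtMax t b) = false := by
          simp only [beq_eq_false_iff_ne, ne_eq]; omega
        simp only [List.foldl_cons, ddtStep, if_neg (by omega : ¬ p.2 > b),
          if_neg (by omega : ¬ p.2 = b), ih, hM, hmax]
        simp [List.find?_cons, List.countP_cons, this]

-- first match of the filter is the find?
theorem head?_filter_eq_find? {α : Type} (q : α → Bool) (l : List α) :
    (l.filter q).head? = l.find? q := by
  induction l with
  | nil => rfl
  | cons x t ih =>
      by_cases h : q x = true
      · simp [List.filter_cons, List.find?_cons, h]
      · simp only [Bool.not_eq_true] at h
        simp [List.filter_cons, List.find?_cons, h, ih]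

-- ===== VERDICT (by name: the statement is the Claim_ definition above) =====
theorem determine_dominant_theme_spec : Claim_equal_determine_dominant_theme := by
  unfold Claim_equal_determine_dominant_theme Spec_determine_dominant_theme
  intro scores _
  cases scores with
  | nil => rfl
  | cons p t =>
      obtain ⟨tk, ts⟩ := p
      -- both sides computed through the invariant
      have hmaxA : PySem.List.max? ((( tk, ts) :: t).map Prod.snd) (fun y => y)
          = some ((t.map Prod.snd).foldl max ts) := by
        simpa using PySem.List.max?_id_cons (x := ts) (t := t.map Prod.snd)
      have hfold : (t.map Prod.snd).foldl max ts = ddtMax t ts := by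
        simp [ddtMax, List.foldl_map]
      set M := ddtMax t ts with hMdef
      have hB : ((tk, ts) :: t).foldl ddtStep (none, "", 0)
          = (some M,
             (if M = ts then tk
              else (((t.find? (fun p => p.2 == M)).map Prod.fst).getD tk)),
             (if M = ts then 1 else 0) + (t.countP (fun p => p.2 == M) : Int)) := by
        simpa using foldl_ddtStep_some t ts tk 1
      unfold determine_dominant_theme determine_dominant_theme_alt
      rw [hB]
      simp only [ne_eq, reduceCtorEq, not_false_eq_true, if_pos, hmaxA, hfold,
        Option.getD_some, ← hMdef]
      by_cases hM0 : M = 0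
      · simp [hM0]
      · simp only [if_neg hM0]
        -- length of top = countP
        have hlen : (((((tk, ts) :: t)).filter (fun p => p.2 == M)).map Prod.fst).length
            = (((tk, ts) :: t)).countP (fun p => p.2 == M) := by
          simp [Eq.symm List.countP_eq_length_filter]
        have hcount : ((((tk, ts) :: t)).countP (fun p => p.2 == M) : Int)
            = (if M = ts then 1 else 0) + (t.countP (fun p => p.2 == M) : Int) := by
          by_cases h : ts = M
          · simp [List.countP_cons, h]; omega
          · have : (ts == M) = false := by simp [h]
            simp [List.countP_cons, this, Ne.symm h]
        rw [hlen]
        by_cases hc : (((tk, ts) :: t)).countP (fun p => p.2 == M) = 1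
        · have hcInt : (if M = ts then 1 else 0) + (t.countP (fun p => p.2 == M) : Int) = 1 := by
            rw [← hcount, hc]; rfl
          simp only [hc, if_pos rfl, hcInt]
          -- top[0] is the first key with value M
          have hne : (((tk, ts) :: t)).filter (fun p => p.2 == M) ≠ [] := by
            intro h
            rw [h] at hlen
            simp at hlen
            omega
          obtain ⟨x, xs, hx⟩ := List.exists_cons_of_ne_nil hne
          have hfind : (((tk, ts) :: t)).find? (fun p => p.2 == M) = some x := by
            rw [← head?_filter_eq_find?, hx]; rfl
          have hget : PySem.List.pyGet? (((((tk, ts) :: t)).filter (fun p => p.2 == M)).map Prod.fst) 0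
              = some x.1 := by
            rw [hx]
            simp [PySem.List.pyGet?, PySem.List.pyIdx?]
          rw [hget]
          have hK : (((((tk, ts) :: t)).find? (fun p => p.2 == M)).map Prod.fst).getD tk
              = (if M = ts then tk
                 else (((t.find? (fun p => p.2 == M)).map Prod.fst).getD tk)) := by
            by_cases h : M = ts
            · simp [h]
            · simp [Ne.symm h, h]
          rw [← hK, hfind]
          simp
        · have hcInt : ¬ ((if M = ts then 1 else 0) + (t.countP (fun p => p.2 == M) : Int) = 1) := by
            rw [← hcount]; exact_mod_cast hc
          simp [hc, hcInt]
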